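-- pv_equiv track=rewrite | github.com/mobilint/mblt-model-zoo | benchmark/transformers/benchmark_text_generation_models.py | _resolve_model_id_from_mxq_name
-- ===== SOURCE A (Python) =====
-- from typing import Any, Iterable, Optional, Sequence, Tuple
--
-- def _resolve_model_id_from_mxq_name(
--     model_part: str,
--     available_model_ids: Sequence[str],
-- ) -> str | None:
--     if model_part in available_model_ids:
--         return model_part
--     model_part_slash = model_part.replace("__", "/")
--     if model_part_slash in available_model_ids:
--         return model_part_slash
--
--     # Fallback: match by repo basename (e.g. Qwen2.5-1.5B-Instruct).
--     basename_matches = [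
--         m for m in available_model_ids if m.split("/", 1)[-1] == model_part
--     ]
--     if len(basename_matches) == 1:
--         return basename_matches[0]
--     basename_matches_slash = [
--         m for m in available_model_ids if m.split("/", 1)[-1] == model_part_slash
--     ]
--     if len(basename_matches_slash) == 1:
--         return basename_matches_slash[0]
--     return None
-- ===== SOURCE B (Python) =====
-- def _resolve_model_id_from_mxq_name(model_part, available_model_ids):
--     # Single pass with accumulators instead of A's staged membership tests and
--     # filtering comprehensions: track whether each exact form occurs and count
--     # (and remember) basename matches, then decide once at the end.
--     model_part_slash = model_part.replace("__", "/")
--     exact = exact_slash = False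
--     n1 = n2 = 0
--     m1 = m2 = None
--     for m in available_model_ids:
--         if m == model_part:
--             exact = True
--         if m == model_part_slash:
--             exact_slash = True
--         b = m.split("/", 1)[-1]
--         if b == model_part:
--             n1 += 1
--             m1 = m
--         if b == model_part_slash:
--             n2 += 1
--             m2 = m
--     if exact:
--         return model_part
--     if exact_slash:
--         return model_part_slash
--     if n1 == 1:
--         return m1
--     if n2 == 1:
--         return m2
--     return None
-- ===== Notes on version B (the rewrite author's own statement) =====
-- stated objective: faster
-- what changed: B replaces A's staged membership tests and two filtering comprehensions (up to four scans of the list) with one single pass that accumulates exact-match flags and basename-match counters/last-match holders, deciding once at the end.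
import Mathlib
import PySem

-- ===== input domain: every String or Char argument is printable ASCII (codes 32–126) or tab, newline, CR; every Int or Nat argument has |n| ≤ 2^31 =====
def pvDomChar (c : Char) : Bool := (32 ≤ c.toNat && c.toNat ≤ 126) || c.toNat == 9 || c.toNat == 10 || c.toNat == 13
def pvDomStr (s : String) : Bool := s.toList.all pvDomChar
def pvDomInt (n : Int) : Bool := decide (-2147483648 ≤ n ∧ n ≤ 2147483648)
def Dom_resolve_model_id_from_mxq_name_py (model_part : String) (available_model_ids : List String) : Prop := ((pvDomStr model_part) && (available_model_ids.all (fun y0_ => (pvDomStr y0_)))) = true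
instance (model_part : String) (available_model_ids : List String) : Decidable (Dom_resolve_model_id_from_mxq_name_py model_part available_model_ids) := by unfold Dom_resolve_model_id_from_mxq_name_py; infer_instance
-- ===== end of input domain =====

-- B replaces A's staged membership tests and two filtering comprehensions with one single pass
-- accumulating flags/counters/last-match holders (one scan instead of up to four).


-- ===== PORT A =====
-- m.split("/", 1)[-1]
def pvBase (m : String) : String :=
  PySem.List.pyGetD ((PySem.Str.splitMax? m "/" 1).getD []) (-1) ""

def resolve_model_id_from_mxq_name_py (model_part : String) (available_model_ids : List String) : Option String :=
  if model_part ∈ available_model_ids then some model_part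
  else
    let model_part_slash := PySem.Str.replace model_part "__" "/"
    if model_part_slash ∈ available_model_ids then some model_part_slash
    else
      let basename_matches := available_model_ids.filter (fun m => pvBase m == model_part)
      if basename_matches.length == 1 then some (PySem.List.pyGetD basename_matches 0 "")
      else
        let basename_matches_slash := available_model_ids.filter (fun m => pvBase m == model_part_slash)
        if basename_matches_slash.length == 1 then some (PySem.List.pyGetD basename_matches_slash 0 "")
        else none

-- ===== PORT B =====
-- state: (exact, exact_slash, n1, m1, n2, m2)
def resolve_model_id_from_mxq_name_py_alt (model_part : String) (available_model_ids : List String) : Option String :=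
  let model_part_slash := PySem.Str.replace model_part "__" "/"
  let st := available_model_ids.foldl
    (fun (s : Bool × Bool × Nat × Option String × Nat × Option String) m =>
      ((if m == model_part then true else s.1),
       (if m == model_part_slash then true else s.2.1),
       (if pvBase m == model_part then s.2.2.1 + 1 else s.2.2.1),
       (if pvBase m == model_part then some m else s.2.2.2.1),
       (if pvBase m == model_part_slash then s.2.2.2.2.1 + 1 else s.2.2.2.2.1),
       (if pvBase m == model_part_slash then some m else s.2.2.2.2.2)))
    (false, false, 0, none, 0, none)
  if st.1 then some model_part
  else if st.2.1 then some model_part_slash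
  else if st.2.2.1 == 1 then st.2.2.2.1
  else if st.2.2.2.2.1 == 1 then st.2.2.2.2.2
  else none

-- ===== PRECONDITION & SPEC =====
def Spec_resolve_model_id_from_mxq_name_py (model_part : String) (available_model_ids : List String) (out : Option String) : Prop := out = resolve_model_id_from_mxq_name_py_alt model_part available_model_ids
instance (model_part : String) (available_model_ids : List String) (out : Option String) : Decidable (Spec_resolve_model_id_from_mxq_name_py model_part available_model_ids out) := by unfold Spec_resolve_model_id_from_mxq_name_py; infer_instance

-- ===== CLAIM (what is proved, stated in full; the proofs are below) =====
def Claim_equal_resolve_model_id_from_mxq_name_py : Prop := ∀ (model_part : String) (available_model_ids : List String), Dom_resolve_model_id_from_mxq_name_py model_part available_model_ids → Spec_resolve_model_id_from_mxq_name_py model_part available_model_ids (resolve_model_id_from_mxq_name_py model_part available_model_ids)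

-- ===== LEMMAS AND PROOFS =====

theorem pv_fold_flag (av : List String) (x : String) (b : Bool) :
    av.foldl (fun (s : Bool) m => if m == x then true else s) b
      = (b || decide (x ∈ av)) := by
  induction av generalizing b with
  | nil => simp
  | cons h t ih =>
    simp only [List.foldl_cons, ih, List.mem_cons]
    by_cases hx : h == x
    · have : x = h := (beq_iff_eq.mp hx).symm
      simp [this]
    · have : ¬ x = h := fun e => hx (beq_iff_eq.mpr e.symm)
      simp [hx, this]

theorem pv_fold_count (av : List String) (p : String → Bool) (n : Nat) :
    av.foldl (fun (k : Nat) m => if p m then k + 1 else k) n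
      = n + (av.filter p).length := by
  induction av generalizing n with
  | nil => simp
  | cons h t ih =>
    by_cases hp : p h <;> simp [List.foldl_cons, ih, hp, Nat.add_assoc, Nat.add_comm 1]

theorem pv_fold_last (av : List String) (p : String → Bool) (acc : Option String) :
    av.foldl (fun (o : Option String) m => if p m then some m else o) acc
      = ((av.filter p).getLast?).or acc := by
  induction av generalizing acc with
  | nil => simp
  | cons h t ih =>
    by_cases hp : p h
    · simp only [List.foldl_cons, hp, if_pos, List.filter_cons_of_pos hp, ih]
      cases hf : t.filter p with
      | nil => simp
      | cons y ys => simp [List.getLast?_cons]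
    · simp [List.foldl_cons, hp, List.filter_cons_of_neg hp, ih]

theorem pv_singleton_get (l : List String) (h : l.length = 1) :
    l.getLast? = some (PySem.List.pyGetD l 0 "") := by
  match l, h with
  | [x], _ => simp [PySem.List.pyGetD_zero_cons]

-- ===== VERDICT (by name: the statement is the Claim_ definition above) =====
theorem resolve_model_id_from_mxq_name_py_spec : Claim_equal_resolve_model_id_from_mxq_name_py := by
  intro model_part available_model_ids _
  unfold Spec_resolve_model_id_from_mxq_name_py
  unfold resolve_model_id_from_mxq_name_py resolve_model_id_from_mxq_name_py_alt
  dsimp only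
  set slash := PySem.Str.replace model_part "__" "/" with hslash
  rw [PySem.List.foldl_prod_mk
        (f := fun (s : Bool) m => if m == model_part then true else s)
        (g := fun (s : Bool × Nat × Option String × Nat × Option String) m =>
          ((if m == slash then true else s.1),
           (if pvBase m == model_part then s.2.1 + 1 else s.2.1),
           (if pvBase m == model_part then some m else s.2.2.1),
           (if pvBase m == slash then s.2.2.2.1 + 1 else s.2.2.2.1),
           (if pvBase m == slash then some m else s.2.2.2.2)))]
  rw [PySem.List.foldl_prod_mk
        (f := fun (s : Bool) m => if m == slash then true else s)
        (g := fun (s : Nat × Option String × Nat × Option String) m =>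
          ((if pvBase m == model_part then s.1 + 1 else s.1),
           (if pvBase m == model_part then some m else s.2.1),
           (if pvBase m == slash then s.2.2.1 + 1 else s.2.2.1),
           (if pvBase m == slash then some m else s.2.2.2)))]
  rw [PySem.List.foldl_prod_mk
        (f := fun (k : Nat) m => if pvBase m == model_part then k + 1 else k)
        (g := fun (s : Option String × Nat × Option String) m =>
          ((if pvBase m == model_part then some m else s.1),
           (if pvBase m == slash then s.2.1 + 1 else s.2.1),
           (if pvBase m == slash then some m else s.2.2)))]
  rw [PySem.List.foldl_prod_mk
        (f := fun (o : Option String) m => if pvBase m == model_part then some m else o)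
        (g := fun (s : Nat × Option String) m =>
          ((if pvBase m == slash then s.1 + 1 else s.1),
           (if pvBase m == slash then some m else s.2)))]
  rw [PySem.List.foldl_prod_mk
        (f := fun (k : Nat) m => if pvBase m == slash then k + 1 else k)
        (g := fun (o : Option String) m => if pvBase m == slash then some m else o)]
  simp only [pv_fold_flag, pv_fold_count, pv_fold_last, Bool.false_or, Nat.zero_add, Option.or_none]
  by_cases h1 : model_part ∈ available_model_ids
  · simp [h1]
  · by_cases h2 : slash ∈ available_model_ids
    · simp [h1, h2]
    · simp only [h1, h2, decide_false, if_false]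
      by_cases h3 : (available_model_ids.filter (fun m => pvBase m == model_part)).length = 1
      · simp [h3, pv_singleton_get _ h3]
      · by_cases h4 : (available_model_ids.filter (fun m => pvBase m == slash)).length = 1
        · simp [h3, h4, pv_singleton_get _ h4]
        · simp [h3, h4]
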